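-- pv_equiv track=rewrite | github.com/zhangxiaoyanhhh/voiceprint | app/main/pncc.py | long_test
-- ===== SOURCE A (Python) =====
-- def long_test(arr):
--     c = ""
--     for i in range(len(arr)):
--         for j in range(len(arr)):
--             if arr[i:len(arr)-j] in arr[i+1:]:
--                 if len(c)<=len(arr[i:len(arr)-j]):
--                     c = arr[i:len(arr)-j]
--     return c
-- ===== SOURCE B (Python) =====
-- def long_test(arr):
--     # Binary search on the repeat length: a repeated substring of length L implies
--     # one of every shorter length, so feasibility is monotone.  For a given L,
--     # scan starts right-to-left with a set of substrings already seen to the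
--     # right; the first hit is the rightmost repeated start, which is exactly the
--     # longest/rightmost winner A's exhaustive scan keeps.
--     n = len(arr)
--
--     def rightmost(L):
--         seen = set()
--         for i in reversed(range(n - L + 1)):
--             s = arr[i:i+L]
--             if s in seen:
--                 return i
--             seen.add(s)
--         return None
--
--     best = ""
--     lo, hi = 1, n - 1
--     while lo <= hi:
--         mid = (lo + hi) // 2
--         i = rightmost(mid)
--         if i is not None:
--             best = arr[i:i+mid]
--             lo = mid + 1
--         else:
--             hi = mid - 1
--     return best
-- ===== Notes on version B (the rewrite author's own statement) =====
-- stated objective: faster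
-- what changed: Instead of testing every slice arr[i:n-j] against the suffix arr[i+1:] and keeping the last longest hit, B binary-searches the repeated-substring length (feasibility is monotone) and, per probed length, scans start positions right-to-left with a hash set of substrings already seen to the right, returning the longest/rightmost winner directly.
import Mathlib
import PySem

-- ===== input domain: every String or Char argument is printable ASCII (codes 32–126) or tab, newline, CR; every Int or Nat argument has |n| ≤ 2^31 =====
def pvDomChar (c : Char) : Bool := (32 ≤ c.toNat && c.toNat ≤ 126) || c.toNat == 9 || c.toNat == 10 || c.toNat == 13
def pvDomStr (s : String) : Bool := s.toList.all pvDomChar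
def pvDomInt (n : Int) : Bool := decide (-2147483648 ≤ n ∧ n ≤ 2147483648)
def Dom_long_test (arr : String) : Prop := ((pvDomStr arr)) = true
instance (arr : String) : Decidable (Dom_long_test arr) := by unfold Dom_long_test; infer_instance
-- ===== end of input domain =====

-- B replaces A's exhaustive slice-vs-suffix scan (every start × every end, keeping
-- the last longest hit) by a binary search on the repeat length whose per-length
-- check scans starts right-to-left with a set of substrings already seen.

-- ===== PORT A =====
def long_test (arr : String) : String :=
  let s := arr.toList
  let n : Int := PySem.List.len s
  String.ofList <|
    (PySem.List.pyRange 0 n 1).foldl (fun c i =>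
      (PySem.List.pyRange 0 n 1).foldl (fun c j =>
        let sub := PySem.List.slice s (some i) (some (n - j))
        if PySem.Chars.isIn sub (PySem.List.slice s (some (i + 1)) none) then
          if PySem.List.len c ≤ PySem.List.len sub then sub else c
        else c) c) []

-- ===== PORT B =====
-- Source B's rightmost(L) ('for i in reversed(range(n - L + 1)): … return i');
-- the early return is modelled by the Option result
def altScan (s : List Char) (L : Int) : List Int → PySem.Set (List Char) → Option Int
  | [], _ => none
  | i :: rest, seen =>
    let sub := PySem.List.slice s (some i) (some (i + L))
    if PySem.Set.contains seen sub then some i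
    else altScan s L rest (PySem.Set.add seen sub)

-- Source B's 'while lo <= hi' binary-search loop, state (lo, hi, best)
def altSearch (s : List Char) (n : Int) (lo hi : Int) (best : List Char) : List Char :=
  if h : lo ≤ hi then
    let mid := PySem.Int.floordiv (lo + hi) 2
    match altScan s mid ((PySem.List.pyRange 0 (n - mid + 1) 1).reverse) PySem.Set.empty with
    | some i => altSearch s n (mid + 1) hi (PySem.List.slice s (some i) (some (i + mid)))
    | none => altSearch s n lo (mid - 1) best
  else best
termination_by (hi + 1 - lo).toNat
decreasing_by
  · have := PySem.Int.floordiv_two_mid_bounds h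
    omega
  · have := PySem.Int.floordiv_two_mid_bounds h
    omega

def long_test_alt (arr : String) : String :=
  let s := arr.toList
  let n : Int := PySem.List.len s
  String.ofList (altSearch s n 1 (n - 1) [])

-- ===== PRECONDITION & SPEC =====
def Spec_long_test (arr : String) (out : String) : Prop := out = long_test_alt arr
instance (arr : String) (out : String) : Decidable (Spec_long_test arr out) := by unfold Spec_long_test; infer_instance

-- ===== CLAIM (what is proved, stated in full; the proofs are below) =====
def Claim_equal_long_test : Prop := ∀ (arr : String), Dom_long_test arr → Spec_long_test arr (long_test arr)

-- ===== LEMMAS AND PROOFS =====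

def pvSub (s : List Char) (i ℓ : Nat) : List Char := (s.drop i).take ℓ

abbrev pvOk (s : List Char) (i ℓ : Nat) : Prop :=
  PySem.Chars.isIn (pvSub s i ℓ) (s.drop (i + 1)) = true

def pvM (s : List Char) (i : Nat) : Nat := Nat.findGreatest (fun ℓ => pvOk s i ℓ) (s.length - i)

def pvBest (s : List Char) : Nat → List Char
  | 0 => []
  | k + 1 =>
    let b := pvBest s k
    if 0 < pvM s k ∧ b.length ≤ pvM s k then pvSub s k (pvM s k) else b

lemma length_pvSub (s : List Char) (i ℓ : Nat) :
    (pvSub s i ℓ).length = min ℓ (s.length - i) := by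
  simp [pvSub]

lemma pvOk_zero (s : List Char) (i : Nat) : pvOk s i 0 := by
  simp [pvOk, pvSub, PySem.Chars.isIn_nil]

lemma le_pvM (s : List Char) (i ℓ : Nat) (h : ℓ ≤ s.length - i) (hok : pvOk s i ℓ) :
    ℓ ≤ pvM s i := Nat.le_findGreatest h hok

lemma pvM_ok (s : List Char) (i : Nat) : pvOk s i (pvM s i) :=
  Nat.findGreatest_spec (Nat.zero_le _) (pvOk_zero s i)

lemma pvM_le (s : List Char) (i : Nat) : pvM s i ≤ s.length - i := Nat.findGreatest_le _

lemma pvOk_le_pred (s : List Char) (i ℓ : Nat) (h : pvOk s i ℓ) (hle : ℓ ≤ s.length - i) :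
    ℓ ≤ s.length - i - 1 := by
  unfold pvOk at h
  rw [PySem.Chars.isIn_iff_infix] at h
  have := h.length_le
  simp [pvSub] at this
  omega

lemma pvOk_iff_repeat (s : List Char) (i L : Nat) (hL : 1 ≤ L) (hiL : i + L ≤ s.length) :
    pvOk s i L ↔ ∃ q, i < q ∧ q ≤ s.length - L ∧ pvSub s q L = pvSub s i L := by
  unfold pvOk
  rw [← PySem.Chars.exists_prefix_drop_iff_isIn]
  constructor
  · rintro ⟨j, hj⟩
    rw [List.drop_drop] at hj
    have hlen : (pvSub s i L).length = L := by simp [pvSub]; omega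
    have htake := List.prefix_iff_eq_take.mp hj
    rw [hlen] at htake
    have hsub : pvSub s (i + 1 + j) L = pvSub s i L := by rw [pvSub, ← htake]
    refine ⟨i + 1 + j, by omega, ?_, hsub⟩
    have h2 : (pvSub s (i + 1 + j) L).length = L := by rw [hsub, hlen]
    rw [length_pvSub] at h2
    omega
  · rintro ⟨q, hq1, hq2, hq3⟩
    refine ⟨q - (i + 1), ?_⟩
    rw [List.drop_drop]
    have he : i + 1 + (q - (i + 1)) = q := by omega
    rw [he, ← hq3]
    exact List.take_prefix _ _

lemma pvOk_mono (s : List Char) (i : Nat) {ℓ ℓ' : Nat} (h : pvOk s i ℓ) (hle : ℓ' ≤ ℓ) :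
    pvOk s i ℓ' := by
  unfold pvOk at *
  rw [PySem.Chars.isIn_iff_infix] at *
  have hp : pvSub s i ℓ' <+: pvSub s i ℓ := by
    simpa [pvSub, List.take_take, Nat.min_eq_left hle] using List.take_prefix ℓ' (pvSub s i ℓ)
  exact hp.isInfix.trans h

-- a repeated substring of some length yields one of every smaller length
def pvFeas (s : List Char) (L : Nat) : Prop := ∃ i, i ≤ s.length - L ∧ pvOk s i L

lemma pvFeas_antitone (s : List Char) {L L' : Nat} (h : pvFeas s L') (hle : L ≤ L') :
    pvFeas s L := by
  obtain ⟨i, hi, hok⟩ := h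
  exact ⟨i, by omega, pvOk_mono s i hok hle⟩

lemma innerA_eq (s : List Char) (i : Nat) (hi : i < s.length) :
    ∀ (K a : Nat) (c : List Char), a + K = s.length →
    (List.range' a K).foldl (fun c j =>
        if pvOk s i (s.length - j - i) then
          (if c.length ≤ s.length - j - i then pvSub s i (s.length - j - i) else c)
        else c) c =
      (let m := Nat.findGreatest (fun ℓ => pvOk s i ℓ) (s.length - a - i)
       if 0 < m ∧ c.length ≤ m then pvSub s i m else c) := by
  intro K
  induction K with
  | zero =>
    intro a c ha
    simp only [List.range', List.foldl_nil]
    have : s.length - a - i = 0 := by omega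
    rw [this]
    simp [Nat.findGreatest]
  | succ K IH =>
    intro a c ha
    rw [List.range'_succ, List.foldl_cons]
    by_cases hz : s.length - a - i = 0
    · -- head candidate is empty
      rw [hz]
      have hok0 : pvOk s i 0 := pvOk_zero s i
      rw [if_pos hok0]
      have hnext : s.length - (a + 1) - i = 0 := by omega
      simp only [Nat.findGreatest_zero, Nat.lt_irrefl, false_and, if_false]
      by_cases hc : c.length ≤ 0
      · have hc0 : c = [] := List.length_eq_zero_iff.mp (by omega)
        rw [if_pos hc]
        have hsub0 : pvSub s i 0 = [] := by simp [pvSub]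
        rw [hsub0, ← hc0]
        rw [IH (a+1) c (by omega), hnext]
        simp
      · rw [if_neg hc, IH (a+1) c (by omega), hnext]
        simp
    · -- head candidate length ℓh ≥ 1
      set ℓh := s.length - a - i with hℓh
      have hstep : s.length - a - i = (s.length - (a+1) - i) + 1 := by omega
      have hfg : Nat.findGreatest (fun ℓ => pvOk s i ℓ) (s.length - a - i)
          = if pvOk s i ℓh then ℓh else Nat.findGreatest (fun ℓ => pvOk s i ℓ) (s.length - (a+1) - i) := by
        have harg : (s.length - (a+1) - i) + 1 = ℓh := by omega
        rw [hstep, Nat.findGreatest_succ, harg]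
      have hnb : Nat.findGreatest (fun ℓ => pvOk s i ℓ) (s.length - (a+1) - i) ≤ s.length - (a+1) - i :=
        Nat.findGreatest_le _
      by_cases hok : pvOk s i ℓh
      · rw [if_pos hok, hfg, if_pos hok]
        by_cases hc : c.length ≤ ℓh
        · rw [if_pos hc, IH (a+1) _ (by omega)]
          have hlen : (pvSub s i ℓh).length = ℓh := by rw [length_pvSub]; omega
          simp only []
          rw [if_neg (by rw [hlen]; omega), if_pos ⟨by omega, hc⟩]
        · rw [if_neg hc, IH (a+1) _ (by omega)]
          simp only []
          rw [if_neg (by omega), if_neg (by omega)]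
      · rw [if_neg hok, hfg, if_neg hok, IH (a+1) _ (by omega)]

lemma foldA_eq (s : List Char) : ∀ (k : Nat), k ≤ s.length →
    (List.range k).foldl (fun c i =>
      (List.range s.length).foldl (fun c j =>
        if pvOk s i (s.length - j - i) then
          (if c.length ≤ s.length - j - i then pvSub s i (s.length - j - i) else c)
        else c) c) [] = pvBest s k := by
  intro k
  induction k with
  | zero => intro _; simp [pvBest]
  | succ k IH =>
    intro hk
    rw [List.range_succ, List.foldl_append, IH (by omega), List.foldl_cons, List.foldl_nil]
    have := innerA_eq s k (by omega) s.length 0 (pvBest s k) (by omega)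
    rw [List.range_eq_range', this]
    simp only [Nat.sub_zero]
    rfl

lemma long_test_eq (arr : String) :
    long_test arr = String.ofList ((List.range arr.toList.length).foldl (fun c i =>
      (List.range arr.toList.length).foldl (fun c j =>
        if pvOk arr.toList i (arr.toList.length - j - i) then
          (if c.length ≤ arr.toList.length - j - i then
            pvSub arr.toList i (arr.toList.length - j - i) else c)
        else c) c) []) := by
  unfold long_test
  simp only [PySem.List.len_eq, PySem.List.pyRange_zero_natCast, List.foldl_map]
  congr 1
  apply PySem.List.foldl_congr_mem
  intro c i hi
  rw [List.mem_range] at hi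
  apply PySem.List.foldl_congr_mem
  intro acc j hj
  rw [List.mem_range] at hj
  have h1 : (arr.toList.length : Int) - (j : Int) = ((arr.toList.length - j : Nat) : Int) := by
    omega
  have h2 : ((i : Int) + 1) = ((i + 1 : Nat) : Int) := by push_cast; ring
  rw [h1, h2, PySem.List.slice_natCast, PySem.List.slice_from_natCast]
  show (if PySem.Chars.isIn (pvSub arr.toList i (arr.toList.length - j - i)) (arr.toList.drop (i+1)) then
      (if PySem.List.len acc ≤ PySem.List.len (pvSub arr.toList i (arr.toList.length - j - i)) then
        pvSub arr.toList i (arr.toList.length - j - i) else acc) else acc) = _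
  have h3 : (pvSub arr.toList i (arr.toList.length - j - i)).length = arr.toList.length - j - i := by
    simp [pvSub]; omega
  simp only [PySem.List.len_eq, h3, Nat.cast_le]

lemma pvBest_spec (s : List Char) : ∀ (k : Nat), k ≤ s.length →
    (pvBest s k = [] ∧ ∀ i < k, pvM s i = 0) ∨
    (∃ i < k, pvBest s k = pvSub s i (pvM s i) ∧ 0 < pvM s i ∧
      (∀ i' < k, pvM s i' ≤ pvM s i) ∧ (∀ i', i < i' → i' < k → pvM s i' < pvM s i)) := by
  intro k
  induction k with
  | zero => intro _; left; exact ⟨rfl, by omega⟩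
  | succ k IH =>
    intro hk
    have hlenSub : (pvSub s k (pvM s k)).length = pvM s k := by
      rw [length_pvSub]
      have := pvM_le s k
      omega
    rcases IH (by omega) with ⟨hb, hz⟩ | ⟨i, hik, hbi, hpos, hmax, hright⟩
    · by_cases hM : 0 < pvM s k
      · right
        refine ⟨k, by omega, ?_, hM, ?_, ?_⟩
        · show pvBest s (k+1) = _
          rw [pvBest, hb]
          simp only [List.length_nil]
          rw [if_pos ⟨hM, by omega⟩]
        · intro i' hi'
          rcases Nat.lt_succ_iff_lt_or_eq.mp hi' with h | h
          · rw [hz i' h]; omega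
          · rw [h]
        · intro i' h1 h2; omega
      · left
        constructor
        · rw [pvBest, hb]
          simp only [List.length_nil]
          rw [if_neg (by omega)]
        · intro i' hi'
          rcases Nat.lt_succ_iff_lt_or_eq.mp hi' with h | h
          · exact hz i' h
          · rw [h]; omega
    · have hblen : (pvBest s k).length = pvM s i := by rw [hbi, length_pvSub]; have := pvM_le s i; omega
      by_cases hcond : 0 < pvM s k ∧ (pvBest s k).length ≤ pvM s k
      · right
        refine ⟨k, by omega, ?_, hcond.1, ?_, ?_⟩
        · rw [pvBest]; simp [hcond]
        · intro i' hi'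
          rcases Nat.lt_succ_iff_lt_or_eq.mp hi' with h | h
          · exact le_trans (hmax i' h) (by omega)
          · rw [h]
        · intro i' h1 h2; omega
      · right
        refine ⟨i, by omega, ?_, hpos, ?_, ?_⟩
        · rw [pvBest]
          rw [if_neg hcond, hbi]
        · intro i' hi'
          rcases Nat.lt_succ_iff_lt_or_eq.mp hi' with h | h
          · exact hmax i' h
          · rw [h]
            rw [hblen] at hcond
            by_cases hMk : 0 < pvM s k
            · push Not at hcond; omega
            · omega
        · intro i' h1 h2
          rcases Nat.lt_succ_iff_lt_or_eq.mp h2 with h | h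
          · exact hright i' h1 h
          · rw [h]
            rw [hblen] at hcond
            by_cases hMk : 0 < pvM s k
            · push Not at hcond
              have := hcond hMk; omega
            · omega

lemma altScan_spec (s : List Char) (L : Nat) (hL : 1 ≤ L) (hLn : L ≤ s.length - 1) :
    ∀ (k : Nat) (seen : PySem.Set (List Char)), k ≤ s.length - L + 1 →
    (∀ x, x ∈ seen ↔ ∃ q, k ≤ q ∧ q ≤ s.length - L ∧ x = pvSub s q L) →
    (let res := altScan s (L : Int) (((List.range k).reverse).map (Nat.cast : Nat → Int)) seen
     (res = none ↔ ¬ ∃ i < k, pvOk s i L) ∧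
     (∀ r, res = some r → ∃ i < k, pvOk s i L ∧ r = (i : Int) ∧
        ∀ i', i < i' → i' < k → ¬ pvOk s i' L)) := by
  intro k
  induction k with
  | zero =>
    intro seen _ _
    refine ⟨by simp [altScan], by simp [altScan]⟩
  | succ k IH =>
    intro seen hk hseen
    have hkL : k ≤ s.length - L := by omega
    have hkLn : k + L ≤ s.length := by omega
    have hcons : (((List.range (k+1)).reverse).map (Nat.cast : Nat → Int))
        = (k : Int) :: ((List.range k).reverse).map (Nat.cast : Nat → Int) := by
      rw [List.range_succ]; simp
    have hslice : PySem.List.slice s (some (k : Int)) (some ((k : Int) + (L : Int)))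
        = pvSub s k L := by
      have : ((k : Int) + (L : Int)) = ((k + L : Nat) : Int) := by push_cast; ring
      rw [this, PySem.List.slice_natCast]
      simp [pvSub]
    have hmem : PySem.Set.contains seen (pvSub s k L) = true ↔ pvOk s k L := by
      rw [PySem.Set.contains_iff, hseen, pvOk_iff_repeat s k L hL hkLn]
      constructor
      · rintro ⟨q, h1, h2, h3⟩
        exact ⟨q, by omega, h2, h3.symm⟩
      · rintro ⟨q, h1, h2, h3⟩
        exact ⟨q, by omega, h2, h3.symm⟩
    rw [hcons]
    simp only [altScan]
    rw [hslice]
    by_cases hhit : PySem.Set.contains seen (pvSub s k L) = true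
    · rw [if_pos hhit]
      have hok : pvOk s k L := hmem.mp hhit
      refine ⟨by simp; exact ⟨k, by omega, hok⟩, ?_⟩
      rintro r hr
      injection hr with hr
      exact ⟨k, by omega, hok, hr.symm, fun i' h1 h2 => by omega⟩
    · rw [if_neg hhit]
      have hnok : ¬ pvOk s k L := fun h => hhit (hmem.mpr h)
      have hseen' : ∀ x, x ∈ PySem.Set.add seen (pvSub s k L) ↔
          ∃ q, k ≤ q ∧ q ≤ s.length - L ∧ x = pvSub s q L := by
        intro x
        rw [PySem.Set.mem_add, hseen]
        constructor
        · rintro (⟨q, h1, h2, h3⟩ | h)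
          · exact ⟨q, by omega, h2, h3⟩
          · exact ⟨k, le_refl _, hkL, h⟩
        · rintro ⟨q, h1, h2, h3⟩
          by_cases hqk : q = k
          · subst hqk; exact Or.inr h3
          · exact Or.inl ⟨q, by omega, h2, h3⟩
      obtain ⟨ihnone, ihsome⟩ := IH (PySem.Set.add seen (pvSub s k L)) (by omega) hseen'
      constructor
      · rw [ihnone]
        constructor
        · rintro hne ⟨i, hi, hok⟩
          by_cases hik : i = k
          · exact hnok (hik ▸ hok)
          · exact hne ⟨i, by omega, hok⟩
        · rintro hne ⟨i, hi, hok⟩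
          exact hne ⟨i, by omega, hok⟩
      · intro r hr
        obtain ⟨i, hi, hok, hre, hrt⟩ := ihsome r hr
        refine ⟨i, by omega, hok, hre, ?_⟩
        intro i' h1 h2
        by_cases hik : i' = k
        · exact hik ▸ hnok
        · exact hrt i' h1 (by omega)

lemma altSearch_spec (s : List Char) : ∀ (fuel : Nat) (lo hi : Int) (best : List Char),
    (hi + 1 - lo).toNat ≤ fuel →
    1 ≤ lo → hi ≤ (s.length : Int) - 1 → lo ≤ hi + 1 →
    (∀ L' : Nat, (hi : Int) < (L' : Int) → L' ≤ s.length - 1 → ¬ pvFeas s L') →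
    ((best = [] ∧ ∀ L' : Nat, 1 ≤ L' → (L' : Int) < lo → ¬ pvFeas s L') ∨
     (∃ L i : Nat, 1 ≤ L ∧ (L : Int) < lo ∧ i ≤ s.length - L ∧ pvOk s i L ∧
        best = pvSub s i L ∧ (∀ i', i < i' → i' ≤ s.length - L → ¬ pvOk s i' L) ∧
        (∀ L' : Nat, L < L' → (L' : Int) < lo → ¬ pvFeas s L'))) →
    ((altSearch s (s.length : Int) lo hi best = [] ∧
        ∀ L' : Nat, 1 ≤ L' → L' ≤ s.length - 1 → ¬ pvFeas s L') ∨
     (∃ L i : Nat, 1 ≤ L ∧ L ≤ s.length - 1 ∧ i ≤ s.length - L ∧ pvOk s i L ∧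
        altSearch s (s.length : Int) lo hi best = pvSub s i L ∧
        (∀ i', i < i' → i' ≤ s.length - L → ¬ pvOk s i' L) ∧
        (∀ L' : Nat, L < L' → L' ≤ s.length - 1 → ¬ pvFeas s L'))) := by
  intro fuel
  induction fuel with
  | zero =>
    intro lo hi best hfuel h1 h2 h3 hhi hbs
    have hlh : ¬ lo ≤ hi := by omega
    rw [altSearch, dif_neg hlh]
    rcases hbs with ⟨hb, hall⟩ | ⟨L, i, hL1, hLlo, hi', hok, hbest, hrt, hmaxL⟩
    · left
      refine ⟨hb, fun L' hL'1 hL'n => ?_⟩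
      by_cases hc : (L' : Int) < lo
      · exact hall L' hL'1 hc
      · exact hhi L' (by omega) hL'n
    · right
      refine ⟨L, i, hL1, by omega, hi', hok, hbest, hrt, fun L' hd hL'n => ?_⟩
      by_cases hc : (L' : Int) < lo
      · exact hmaxL L' hd hc
      · exact hhi L' (by omega) hL'n
  | succ fuel IH =>
    intro lo hi best hfuel h1 h2 h3 hhi hbs
    by_cases hlh : lo ≤ hi
    · rw [altSearch, dif_pos hlh]
      simp only [letFun] at *
      obtain ⟨hmlo, hmhi⟩ := PySem.Int.floordiv_two_mid_bounds hlh
      set mid := PySem.Int.floordiv (lo + hi) 2 with hmid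
      have hn1 : 1 ≤ s.length := by omega
      set m := mid.toNat with hm
      have hmcast : (m : Int) = mid := Int.toNat_of_nonneg (by omega)
      have hm1 : 1 ≤ m := by omega
      have hmn : m ≤ s.length - 1 := by omega
      have hlist : (PySem.List.pyRange 0 ((s.length : Int) - mid + 1) 1).reverse
          = ((List.range (s.length - m + 1)).reverse).map (Nat.cast : Nat → Int) := by
        have he : (s.length : Int) - mid + 1 = ((s.length - m + 1 : Nat) : Int) := by
          push_cast; omega
        rw [he, PySem.List.pyRange_zero_natCast, List.map_reverse]
      have hempty : ∀ x, x ∈ (PySem.Set.empty : PySem.Set (List Char)) ↔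
          ∃ q, s.length - m + 1 ≤ q ∧ q ≤ s.length - m ∧ x = pvSub s q m := by
        intro x
        constructor
        · intro h; exact absurd h (List.not_mem_nil)
        · rintro ⟨q, hq1, hq2, _⟩; omega
      obtain ⟨scnone, scsome⟩ := altScan_spec s m hm1 hmn (s.length - m + 1) PySem.Set.empty
        (by omega) hempty
      have hmm : (m : Int) = mid := hmcast
      rw [hlist, ← hmm]
      cases hres : altScan s ((m : Nat) : Int)
          (((List.range (s.length - m + 1)).reverse).map (Nat.cast : Nat → Int)) PySem.Set.empty with
      | some r =>
        obtain ⟨i₀, hi₀k, hok₀, hre, hrt₀⟩ := scsome r hres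
        subst hre
        have hslice : PySem.List.slice s (some ((i₀ : Nat) : Int)) (some (((i₀ : Nat) : Int) + ((m : Nat) : Int)))
            = pvSub s i₀ m := by
          have : ((i₀ : Nat) : Int) + ((m : Nat) : Int) = ((i₀ + m : Nat) : Int) := by push_cast; ring
          rw [this, PySem.List.slice_natCast]
          simp [pvSub]
        dsimp only
        rw [hslice]
        apply IH ((m : Int) + 1) hi (pvSub s i₀ m) (by omega) (by omega) h2 (by omega) hhi
        right
        refine ⟨m, i₀, hm1, by omega, by omega, hok₀, rfl, ?_, ?_⟩
        · intro i' hlt hle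
          exact hrt₀ i' hlt (by omega)
        · intro L' hd hlt
          exfalso
          omega
      | none =>
        dsimp only
        have hnofeas : ¬ pvFeas s m := by
          rintro ⟨i, hi, hok⟩
          exact (scnone.mp hres) ⟨i, by omega, hok⟩
        apply IH lo ((m : Int) - 1) best (by omega) h1 (by omega) (by omega) ?_ hbs
        intro L' hgt hle
        by_cases hc : (hi : Int) < (L' : Int)
        · exact hhi L' hc hle
        · intro hfe
          exact hnofeas (pvFeas_antitone s hfe (by omega))
    · rw [altSearch, dif_neg hlh]
      rcases hbs with ⟨hb, hall⟩ | ⟨L, i, hL1, hLlo, hi', hok, hbest, hrt, hmaxL⟩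
      · left
        refine ⟨hb, fun L' hL'1 hL'n => ?_⟩
        by_cases hc : (L' : Int) < lo
        · exact hall L' hL'1 hc
        · exact hhi L' (by omega) hL'n
      · right
        refine ⟨L, i, hL1, by omega, hi', hok, hbest, hrt, fun L' hd hL'n => ?_⟩
        by_cases hc : (L' : Int) < lo
        · exact hmaxL L' hd hc
        · exact hhi L' (by omega) hL'n

lemma main_eq (arr : String) :
    String.ofList (pvBest arr.toList arr.toList.length) = long_test_alt arr := by
  unfold long_test_alt
  simp only [PySem.List.len_eq]
  set s := arr.toList with hs
  set n := s.length with hn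
  by_cases hn0 : n = 0
  · rw [hn0, altSearch, dif_neg (by omega)]
    rfl
  · congr 1
    have hres := altSearch_spec s n 1 ((n : Int) - 1) [] (by omega) (by omega) (by omega)
      (by omega) (by intro L' h1 h2; omega)
      (Or.inl ⟨rfl, by intro L' h1 h2; omega⟩)
    rcases pvBest_spec s n (le_refl _) with ⟨hb, hz⟩ | ⟨i, hik, hbi, hpos, hmax, hright⟩
    · rw [hb]
      rcases hres with ⟨he, _⟩ | ⟨L, i, hL1, hLn, hi', hok, he, _, _⟩
      · rw [he]
      · exfalso
        have hiM : L ≤ pvM s i := le_pvM s i L (by omega) hok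
        have : pvM s i = 0 := hz i (by omega)
        omega
    · set V := pvM s i with hV
      have hVn : V ≤ n - i := pvM_le s i
      have hVP : V ≤ n - i - 1 := pvOk_le_pred s i V (pvM_ok s i) hVn
      rcases hres with ⟨he, hnofe⟩ | ⟨L, i', hL1, hLn, hi', hok, he, hrt, hmaxL⟩
      · exfalso
        exact hnofe V hpos (by omega) ⟨i, by omega, pvM_ok s i⟩
      · have hi'n : i' < n := by omega
        have hLMi' : L ≤ pvM s i' := le_pvM s i' L (by omega) hok
        have hLV : L ≤ V := le_trans hLMi' (hmax i' hi'n)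
        have hVL : V ≤ L := by
          by_contra hlt
          exact hmaxL V (by omega) (by omega) ⟨i, by omega, pvM_ok s i⟩
        have hLeq : L = V := le_antisymm hLV hVL
        have hii' : i = i' := by
          rcases Nat.lt_trichotomy i i' with h | h | h
          · have := hright i' h hi'n
            omega
          · exact h
          · exfalso
            exact hrt i h (by omega) (hLeq ▸ pvM_ok s i)
        rw [hbi, he, hii', hLeq]

-- ===== VERDICT (by name: the statement is the Claim_ definition above) =====
theorem long_test_spec : Claim_equal_long_test := by
  intro arr _
  unfold Spec_long_test
  rw [long_test_eq, foldA_eq arr.toList arr.toList.length (le_refl _)]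
  exact main_eq arr
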